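-- pv_equiv track=rewrite | github.com/taka3693/-agent-os | learning/insight_report.py | _get_common_failure_codes
-- ===== SOURCE A (Python) =====
-- from collections import defaultdict
-- from typing import Any, Dict, List, Optional
--
-- def _get_common_failure_codes(failures: List[Dict[str, Any]]) -> List[str]:
--     """Get common failure codes across failures.
--
--     Args:
--         failures: List of failure dicts with failure_codes
--
--     Returns:
--         List of common failure codes
--     """
--     code_counts = defaultdict(int)
--
--     for f in failures:
--         for code in f.get("failure_codes", []):
--             code_counts[code] += 1
--
--     # Return codes that appear in at least half of failures
--     threshold = len(failures) / 2
--     common = [code for code, count in code_counts.items() if count >= threshold]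
--
--     return sorted(common)
-- ===== SOURCE B (Python) =====
-- def _get_common_failure_codes(failures):
--     all_codes = sorted(c for f in failures for c in f.get("failure_codes", []))
--     n = len(failures)
--     result = []
--     rest = all_codes
--     while rest:
--         x = rest[0]
--         k = 1
--         while k < len(rest) and rest[k] == x:
--             k += 1
--         if 2 * k >= n:
--             result.append(x)
--         rest = rest[k:]
--     return result
-- ===== Notes on version B (the rewrite author's own statement) =====
-- stated objective: alternative
-- what changed: B replaces A's frequency dict entirely: it sorts the flattened code list once and then scans it for runs of equal adjacent codes, emitting a run's code when the run length reaches half the failure count; the output is already sorted, so no counter and no final key sort exist.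
import Mathlib
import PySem

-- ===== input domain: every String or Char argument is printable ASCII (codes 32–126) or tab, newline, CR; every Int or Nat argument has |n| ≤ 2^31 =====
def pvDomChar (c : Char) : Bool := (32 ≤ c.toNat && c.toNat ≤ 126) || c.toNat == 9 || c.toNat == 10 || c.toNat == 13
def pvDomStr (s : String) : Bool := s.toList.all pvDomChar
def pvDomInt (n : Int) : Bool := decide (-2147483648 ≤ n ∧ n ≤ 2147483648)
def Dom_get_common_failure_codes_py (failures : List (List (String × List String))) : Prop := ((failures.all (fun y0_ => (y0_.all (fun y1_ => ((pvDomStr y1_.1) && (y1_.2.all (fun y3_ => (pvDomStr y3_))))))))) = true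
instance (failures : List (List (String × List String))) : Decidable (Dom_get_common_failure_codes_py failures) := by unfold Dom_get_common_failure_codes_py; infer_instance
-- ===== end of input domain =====

-- B drops A's frequency dict: it sorts the flat code list once and scans it for runs of
-- equal adjacent codes, emitting a run's code when the run reaches half the failure count
-- (objective: alternative — a sort-then-run-scan instead of counter-filter-sort).

-- ===== PORT A =====
-- A builds a counter dict over a nested loop, filters its items by count ≥ len/2, sorts the keys.
-- 'count >= len(failures)/2' (float threshold) is ported as '2*count ≥ len' — exact, since count
-- is an integer and len/2 a half-integer exactly representable for the lengths at hand.
def get_common_failure_codes_py (failures : List (List (String × List String))) : List String :=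
  let code_counts : PySem.Dict String Int :=
    failures.foldl (fun d f =>
      ((PySem.Dict.mk f).getD "failure_codes" []).foldl
        (fun d code => d.modify code 0 (· + 1)) d) PySem.Dict.empty
  let common := (code_counts.items.filter (fun p => 2 * p.2 ≥ (failures.length : Int))).map (·.1)
  PySem.List.sorted common (fun x => x) false

-- ===== PORT B =====
-- Source B's outer while loop over the still-unscanned suffix 'rest' of the sorted list is this
-- structural recursion; the inner 'while rest[k] == x: k += 1' run measure k is 1 + the
-- takeWhile length, and 'rest = rest[k:]' is the matching dropWhile. '2 * k >= n' is integer
-- in Source B too.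
def pvRunScan (n : Int) : List String → List String
  | [] => []
  | x :: xs =>
    let k : Int := 1 + ((xs.takeWhile (· == x)).length : Int)
    let rest := xs.dropWhile (· == x)
    if 2 * k ≥ n then x :: pvRunScan n rest else pvRunScan n rest
termination_by l => l.length
decreasing_by
  all_goals simpa using Nat.lt_succ_of_le (List.length_dropWhile_le _ _)

def get_common_failure_codes_py_alt (failures : List (List (String × List String))) : List String :=
  let all_codes :=
    PySem.List.sorted (failures.flatMap (fun f => (PySem.Dict.mk f).getD "failure_codes" []))
      (fun x => x) false
  pvRunScan (failures.length : Int) all_codes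

-- ===== PRECONDITION & SPEC =====
def Spec_get_common_failure_codes_py (failures : List (List (String × List String))) (out : List String) : Prop := out = get_common_failure_codes_py_alt failures
instance (failures : List (List (String × List String))) (out : List String) : Decidable (Spec_get_common_failure_codes_py failures out) := by unfold Spec_get_common_failure_codes_py; infer_instance

-- ===== CLAIM (what is proved, stated in full; the proofs are below) =====
def Claim_equal_get_common_failure_codes_py : Prop := ∀ (failures : List (List (String × List String))), Dom_get_common_failure_codes_py failures → Spec_get_common_failure_codes_py failures (get_common_failure_codes_py failures)

-- ===== LEMMAS AND PROOFS =====

-- A's nested counting loop is Counter(all_codes) where all_codes is the flattened list.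
theorem counts_eq_counter (failures : List (List (String × List String))) :
    failures.foldl (fun d f =>
      ((PySem.Dict.mk f).getD "failure_codes" []).foldl
        (fun d code => d.modify code 0 (· + 1)) d) PySem.Dict.empty
    = PySem.Dict.counter
        (failures.flatMap (fun f => (PySem.Dict.mk f).getD "failure_codes" [])) := by
  rw [PySem.Dict.counter_eq_foldl, List.flatMap_def, List.foldl_flatten, List.foldl_map]

-- In a ≤-sorted list x :: xs, every element surviving 'dropWhile (== x)' is strictly above x.
theorem lt_of_mem_dropWhile_sorted {x y : String} {xs : List String}
    (hp : (x :: xs).Pairwise (· ≤ ·)) (hy : y ∈ xs.dropWhile (· == x)) : x < y := by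
  induction xs with
  | nil => simp at hy
  | cons a l ih =>
    rw [List.dropWhile_cons] at hy
    rcases List.pairwise_cons.1 hp with ⟨hxall, hal⟩
    by_cases hax : (a == x) = true
    · simp only [hax, if_true] at hy
      exact ih (List.pairwise_cons.2 ⟨fun y hy' => hxall y (by simp [hy']),
        (List.pairwise_cons.1 hal).2⟩) hy
    · simp only [hax] at hy
      have hxa : x < a := lt_of_le_of_ne (hxall a (by simp)) (by
        intro h; exact hax (by simp [h.symm]))
      rcases List.mem_cons.1 hy with rfl | hyl
      · exact hxa
      · exact lt_of_lt_of_le hxa ((List.pairwise_cons.1 hal).1 y hyl)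

-- Run-scan characterisation on a ≤-sorted list: membership is "count reaches the threshold",
-- and the output is strictly increasing.
theorem pvRunScan_spec (n : Int) (s : List String) (hs : s.Pairwise (· ≤ ·)) :
    (∀ y, y ∈ pvRunScan n s ↔ (y ∈ s ∧ 2 * (s.count y : Int) ≥ n)) ∧
      (pvRunScan n s).Pairwise (· < ·) := by
  induction s using pvRunScan.induct n with
  | case1 => simp [pvRunScan]
  | case2 x xs k rest hk ih =>
    have hrest : rest.Pairwise (· ≤ ·) :=
      (List.pairwise_cons.1 (List.Pairwise.sublist ((List.dropWhile_sublist _).cons_cons x) hs)).2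
    have hgt : ∀ y ∈ rest, x < y := fun y hy => lt_of_mem_dropWhile_sorted hs hy
    rcases ih hrest with ⟨hmem, hpw⟩
    have hsplit : xs = xs.takeWhile (· == x) ++ rest := (List.takeWhile_append_dropWhile).symm
    have htw : ∀ y ∈ xs.takeWhile (· == x), y = x := fun y hy => by
      have := List.mem_takeWhile_imp hy; simpa using this
    have hcx : ((x :: xs).count x : Int) = 1 + ((xs.takeWhile (· == x)).length : Int) := by
      have h0 : rest.count x = 0 := by
        rw [List.count_eq_zero]; intro hx; exact absurd rfl (ne_of_gt (hgt x hx))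
      have h1 : (xs.takeWhile (· == x)).count x = (xs.takeWhile (· == x)).length := by
        apply List.count_eq_length.2; intro y hy; simpa using (htw y hy).symm
      have h2 : (x :: xs).count x = (xs.takeWhile (· == x)).length + 1 := by
        conv_lhs => rw [List.count_cons_self, hsplit]
        rw [List.count_append, h0, h1]
      rw [h2]; push_cast; ring
    have hcy : ∀ y, y ≠ x → ((x :: xs).count y : Int) = (rest.count y : Int) := by
      intro y hyx
      have h1 : (xs.takeWhile (· == x)).count y = 0 := by
        rw [List.count_eq_zero]; intro hy; exact hyx (htw y hy)
      have h2 : (x :: xs).count y = rest.count y := by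
        rw [hsplit, List.count_cons, List.count_append, h1]
        simp [Ne.symm hyx]
      exact_mod_cast congrArg (Nat.cast : Nat → Int) h2
    have hmem' : ∀ y, y ≠ x → (y ∈ rest ↔ y ∈ x :: xs) := by
      intro y hyx
      constructor
      · intro hy; exact List.mem_cons_of_mem _ (hsplit ▸ List.mem_append_right _ hy)
      · intro hy
        rcases List.mem_cons.1 hy with rfl | hy'
        · exact absurd rfl hyx
        · rcases List.mem_append.1 (hsplit ▸ hy') with h | h
          · exact absurd (htw y h) hyx
          · exact h
    have hk' : 2 * (1 + ((xs.takeWhile (· == x)).length : Int)) ≥ n := hk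
    have hstep : pvRunScan n (x :: xs) = x :: pvRunScan n rest := by
      rw [pvRunScan]; exact if_pos hk'
    rw [hstep]
    refine ⟨fun y => ?_, List.pairwise_cons.2 ⟨fun y hy => hgt y ((hmem y).1 hy).1, hpw⟩⟩
    by_cases hyx : y = x
    · subst hyx
      constructor
      · intro _
        exact ⟨by simp, by rw [hcx]; exact hk'⟩
      · intro _
        simp
    · rw [List.mem_cons, or_iff_right hyx, List.mem_cons, or_iff_right hyx, hmem y,
        hmem' y hyx, hcy y hyx, List.mem_cons, or_iff_right hyx]
  | case3 x xs k rest hk ih =>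
    have hrest : rest.Pairwise (· ≤ ·) :=
      (List.pairwise_cons.1 (List.Pairwise.sublist ((List.dropWhile_sublist _).cons_cons x) hs)).2
    have hgt : ∀ y ∈ rest, x < y := fun y hy => lt_of_mem_dropWhile_sorted hs hy
    rcases ih hrest with ⟨hmem, hpw⟩
    have hsplit : xs = xs.takeWhile (· == x) ++ rest := (List.takeWhile_append_dropWhile).symm
    have htw : ∀ y ∈ xs.takeWhile (· == x), y = x := fun y hy => by
      have := List.mem_takeWhile_imp hy; simpa using this
    have hcx : ((x :: xs).count x : Int) = 1 + ((xs.takeWhile (· == x)).length : Int) := by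
      have h0 : rest.count x = 0 := by
        rw [List.count_eq_zero]; intro hx; exact absurd rfl (ne_of_gt (hgt x hx))
      have h1 : (xs.takeWhile (· == x)).count x = (xs.takeWhile (· == x)).length := by
        apply List.count_eq_length.2; intro y hy; simpa using (htw y hy).symm
      have h2 : (x :: xs).count x = (xs.takeWhile (· == x)).length + 1 := by
        conv_lhs => rw [List.count_cons_self, hsplit]
        rw [List.count_append, h0, h1]
      rw [h2]; push_cast; ring
    have hcy : ∀ y, y ≠ x → ((x :: xs).count y : Int) = (rest.count y : Int) := by
      intro y hyx
      have h1 : (xs.takeWhile (· == x)).count y = 0 := by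
        rw [List.count_eq_zero]; intro hy; exact hyx (htw y hy)
      have h2 : (x :: xs).count y = rest.count y := by
        rw [hsplit, List.count_cons, List.count_append, h1]
        simp [Ne.symm hyx]
      exact_mod_cast congrArg (Nat.cast : Nat → Int) h2
    have hmem' : ∀ y, y ≠ x → (y ∈ rest ↔ y ∈ x :: xs) := by
      intro y hyx
      constructor
      · intro hy; exact List.mem_cons_of_mem _ (hsplit ▸ List.mem_append_right _ hy)
      · intro hy
        rcases List.mem_cons.1 hy with rfl | hy'
        · exact absurd rfl hyx
        · rcases List.mem_append.1 (hsplit ▸ hy') with h | h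
          · exact absurd (htw y h) hyx
          · exact h
    have hk' : ¬ 2 * (1 + ((xs.takeWhile (· == x)).length : Int)) ≥ n := hk
    have hstep : pvRunScan n (x :: xs) = pvRunScan n rest := by
      rw [pvRunScan]; exact if_neg hk'
    rw [hstep]
    refine ⟨fun y => ?_, hpw⟩
    by_cases hyx : y = x
    · subst hyx
      rw [hmem y]
      constructor
      · intro ⟨hy, _⟩; exact absurd rfl (ne_of_gt (hgt y hy))
      · intro ⟨_, hc⟩; rw [hcx] at hc; exact absurd hc hk'
    · rw [hmem y, hmem' y hyx, hcy y hyx]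

-- ===== VERDICT (by name: the statement is the Claim_ definition above) =====
theorem get_common_failure_codes_py_spec : Claim_equal_get_common_failure_codes_py := by
  intro failures _
  unfold Spec_get_common_failure_codes_py get_common_failure_codes_py get_common_failure_codes_py_alt
  set all := failures.flatMap (fun f => (PySem.Dict.mk f).getD "failure_codes" []) with hall
  set n : Int := (failures.length : Int)
  set S := PySem.List.sorted all (fun x => x) false with hS
  have hSperm : S.Perm all := PySem.List.sorted_perm all (fun x => x) false
  have hSpw : S.Pairwise (· ≤ ·) := PySem.List.sorted_pairwise all (fun x => x)
  rcases pvRunScan_spec n S hSpw with ⟨hmem, hpw⟩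
  simp only [counts_eq_counter, PySem.Dict.items_counter, List.filter_map, List.map_map]
  have hF : ((PySem.Set.ofList all).filter
      ((fun p => decide (2 * p.2 ≥ n)) ∘ fun k => (k, (all.count k : Int)))).map
      ((·.1) ∘ fun k => (k, (all.count k : Int)))
      = (PySem.Set.ofList all).filter (fun c => decide (2 * (all.count c : Int) ≥ n)) := by
    simp [Function.comp_def]
  rw [hF]
  refine PySem.List.sorted_eq_of_perm_of_pairwise_lt _ _ _ ?_ hpw
  apply (List.perm_ext_iff_of_nodup (hpw.imp ne_of_lt)
    ((PySem.Set.nodup_ofList all).filter _)).2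
  intro y
  rw [hmem y, List.mem_filter, PySem.Set.mem_ofList, hSperm.mem_iff, hSperm.count_eq]
  simp [ge_iff_le]
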